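-- pv_equiv track=rewrite | github.com/MrLuluCat/DataMiningUTS | nodeSearch.py | TotalImpurity
-- ===== SOURCE A (Python) =====
-- def TotalImpurity(parm, parm2):
--
--     Doors4More = ('4', 'more')
--     Person4More = ('4', 'More')
--     LugageMedBig = ('med', 'big')
--     SafetyMedHigh = ('med', 'high')
--
--     search = []
--     if (parm2 == 'MedHigh'):
--         search.extend(SafetyMedHigh)
--     elif (parm2 == 'more'):
--         search.extend(Doors4More)
--     elif (parm2 == 'MedBig'):
--         search.extend(LugageMedBig)
--     elif (parm2 == '4more'):
--         search.extend(Person4More)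
--     else:
--         search.append(parm2)
--
--     flag = 0
--     for i in range(len(parm)):
--         if (parm[i] in search):
--             flag += 1
--
--     return flag
-- ===== SOURCE B (Python) =====
-- def TotalImpurity(parm, parm2):
--     table = {
--         'MedHigh': ('med', 'high'),
--         'more': ('4', 'more'),
--         'MedBig': ('med', 'big'),
--         '4more': ('4', 'More'),
--     }
--     search = table.get(parm2, (parm2,))
--     return sum(parm.count(v) for v in search)
-- ===== Notes on version B (the rewrite author's own statement) =====
-- stated objective: simpler
-- what changed: Replaces the if/elif chain plus an index loop with per-element membership tests by a lookup table of candidate tuples and a sum of parm.count(v) over the (duplicate-free) candidates, inverting the loop shape.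
import Mathlib
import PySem

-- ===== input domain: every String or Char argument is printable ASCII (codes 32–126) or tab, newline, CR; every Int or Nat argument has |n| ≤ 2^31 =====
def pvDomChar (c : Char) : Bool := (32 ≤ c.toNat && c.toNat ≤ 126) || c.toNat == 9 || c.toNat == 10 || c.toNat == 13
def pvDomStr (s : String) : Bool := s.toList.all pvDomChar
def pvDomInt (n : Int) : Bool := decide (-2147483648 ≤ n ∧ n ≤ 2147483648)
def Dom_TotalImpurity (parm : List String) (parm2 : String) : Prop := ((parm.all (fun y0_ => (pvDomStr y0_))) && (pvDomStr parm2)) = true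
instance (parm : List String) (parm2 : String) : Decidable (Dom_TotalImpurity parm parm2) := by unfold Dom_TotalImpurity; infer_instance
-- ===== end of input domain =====

-- B replaces the if/elif chain + index loop with a candidate table and a sum of per-candidate counts (same cost, simpler shape).

-- ===== PORT A =====
-- literal port of A: if/elif chain builds `search`, then an index loop counts membership hits
-- (parm[i] is ported as pyGetD parm i ""; the loop index is always in range, so this is exact)
def TotalImpurity (parm : List String) (parm2 : String) : Int :=
  let search : List String :=
    if parm2 = "MedHigh" then ["med", "high"]
    else if parm2 = "more" then ["4", "more"]
    else if parm2 = "MedBig" then ["med", "big"]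
    else if parm2 = "4more" then ["4", "More"]
    else [parm2]
  (PySem.List.pyRange 0 (parm.length : Int) 1).foldl
    (fun flag i => if PySem.List.pyGetD parm i "" ∈ search then flag + 1 else flag) 0

-- ===== PORT B =====
-- literal port of Source B: dict table of candidate tuples, then sum(parm.count(v) for v in search)
def TotalImpurity_alt (parm : List String) (parm2 : String) : Int :=
  let table : PySem.Dict String (List String) :=
    ((((PySem.Dict.empty).insert "MedHigh" ["med", "high"]).insert "more" ["4", "more"]).insert
        "MedBig" ["med", "big"]).insert "4more" ["4", "More"]
  let search := table.getD parm2 [parm2]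
  search.foldl (fun acc v => acc + (PySem.List.count parm v : Int)) 0

-- ===== PRECONDITION & SPEC =====
def Spec_TotalImpurity (parm : List String) (parm2 : String) (out : Int) : Prop := out = TotalImpurity_alt parm parm2
instance (parm : List String) (parm2 : String) (out : Int) : Decidable (Spec_TotalImpurity parm parm2 out) := by unfold Spec_TotalImpurity; infer_instance

-- ===== CLAIM (what is proved, stated in full; the proofs are below) =====
def Claim_equal_TotalImpurity : Prop := ∀ (parm : List String) (parm2 : String), Dom_TotalImpurity parm parm2 → Spec_TotalImpurity parm parm2 (TotalImpurity parm parm2)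

-- ===== LEMMAS AND PROOFS =====

-- membership count against v :: rest splits when v is not in rest
lemma countP_cons_mem (parm rest : List String) (v : String) (hv : v ∉ rest) :
    parm.countP (fun x => decide (x ∈ v :: rest))
      = parm.count v + parm.countP (fun x => decide (x ∈ rest)) := by
  induction parm with
  | nil => simp
  | cons x xs ih =>
    simp only [List.countP_cons, List.count_cons, ih]
    by_cases hxv : x = v
    · subst hxv; simp [hv]; omega
    · by_cases hxr : x ∈ rest <;> simp [hxv, hxr] <;> omega

-- one membership-count pass over parm equals the sum of per-candidate counts, for duplicate-free candidates
lemma flag_eq (parm search : List String) (h : search.Nodup) :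
    parm.foldl (fun flag x => if x ∈ search then flag + 1 else flag) 0
      = search.foldl (fun acc v => acc + (PySem.List.count parm v : Int)) 0 := by
  rw [PySem.List.foldl_ite_add_one, PySem.List.foldl_add]
  simp only [zero_add, PySem.List.count_eq]
  induction search with
  | nil => simp
  | cons v rest ih =>
    rcases List.nodup_cons.mp h with ⟨hv, hrest⟩
    rw [countP_cons_mem parm rest v hv]
    push_cast
    rw [ih hrest]
    simp

theorem TotalImpurity_spec : Claim_equal_TotalImpurity := by
  unfold Claim_equal_TotalImpurity
  intro parm parm2 _
  unfold Spec_TotalImpurity TotalImpurity TotalImpurity_alt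
  rw [PySem.List.foldl_pyRange_zero_pyGetD' parm ""
    (fun flag x => if x ∈ (if parm2 = "MedHigh" then ["med", "high"]
      else if parm2 = "more" then ["4", "more"]
      else if parm2 = "MedBig" then ["med", "big"]
      else if parm2 = "4more" then ["4", "More"]
      else [parm2]) then flag + 1 else flag) 0]
  by_cases h1 : parm2 = "MedHigh"
  · subst h1; simp only [if_pos]
    exact flag_eq parm _ (by decide)
  by_cases h2 : parm2 = "more"
  · subst h2; simp only [if_neg h1]
    exact flag_eq parm _ (by decide)
  by_cases h3 : parm2 = "MedBig"
  · subst h3; simp only [if_neg h1, if_neg h2]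
    exact flag_eq parm _ (by decide)
  by_cases h4 : parm2 = "4more"
  · subst h4; simp only [if_neg h1, if_neg h2, if_neg h3]
    exact flag_eq parm _ (by decide)
  · simp only [if_neg h1, if_neg h2, if_neg h3, if_neg h4]
    have : (((((PySem.Dict.empty).insert "MedHigh" ["med", "high"]).insert "more"
        ["4", "more"]).insert "MedBig" ["med", "big"]).insert "4more"
        ["4", "More"] : PySem.Dict String (List String)).getD parm2 [parm2] = [parm2] := by
      simp [PySem.Dict.getD, PySem.Dict.get?_insert_of_ne _ _ (by simpa using h4),
        PySem.Dict.get?_insert_of_ne _ _ (by simpa using h3),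
        PySem.Dict.get?_insert_of_ne _ _ (by simpa using h2),
        PySem.Dict.get?_insert_of_ne _ _ (by simpa using h1)]
    rw [this]
    exact flag_eq parm [parm2] (List.nodup_singleton parm2)
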